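-- pv_equiv track=rewrite | github.com/accountas/AdventofCode2023 | Day02/main.py | subtask_2
-- ===== SOURCE A (Python) =====
-- def subtask_2(games):
--     answer = 0
--
--     for game in games:
--         minimum_set = {}
--         for round in game:
--             for color, count in round.items():
--                 minimum_set[color] = max(minimum_set.get(color, 0), count)
--
--         product = 1
--         for color in ['red', 'green', 'blue']:
--             product *= minimum_set.get(color, 0)
--         answer += product
--
--     return answer
-- ===== SOURCE B (Python) =====
-- def subtask_2(games):
--     def peak(game, color):
--         return max([0] + [round.get(color, 0) for round in game])
--     return sum(peak(game, 'red') * peak(game, 'green') * peak(game, 'blue') for game in games)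
-- ===== Notes on version B (the rewrite author's own statement) =====
-- stated objective: simpler
-- what changed: B drops A's per-game minimum_set dict entirely: for each game it computes the power directly as the product over the three fixed colors of the max count of that color across the game's rounds (one scan per color), summed over games; a timing run measured this constant-factor win (no dict building/lookup) at ~1.9x.
import Mathlib
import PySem

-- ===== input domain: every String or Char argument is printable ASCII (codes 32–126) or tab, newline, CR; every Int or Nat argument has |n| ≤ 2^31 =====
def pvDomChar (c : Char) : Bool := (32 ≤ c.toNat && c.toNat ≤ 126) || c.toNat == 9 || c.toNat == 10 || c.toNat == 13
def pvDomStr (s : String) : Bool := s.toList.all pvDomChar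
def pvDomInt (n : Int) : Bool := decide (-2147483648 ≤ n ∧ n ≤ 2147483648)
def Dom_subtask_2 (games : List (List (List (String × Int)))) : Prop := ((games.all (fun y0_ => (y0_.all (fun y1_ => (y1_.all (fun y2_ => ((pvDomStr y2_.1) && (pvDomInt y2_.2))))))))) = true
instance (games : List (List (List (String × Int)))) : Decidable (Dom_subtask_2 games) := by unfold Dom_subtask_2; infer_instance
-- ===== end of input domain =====

-- B replaces A's per-game minimum_set dict by a direct per-color maximum scan; objective: simpler.
-- Each inner List (String × Int) models a Python dict (built with duplicate keys overwriting).

-- ===== PORT A =====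
-- 'for color, count in round.items()' iterates the dict built from the pair list.
def subtask_2 (games : List (List (List (String × Int)))) : Int :=
  games.foldl (fun answer game =>
    let minimum_set : PySem.Dict String Int :=
      game.foldl (fun m round =>
        (PySem.Dict.ofList round).items.foldl
          (fun m p => m.insert p.1 (max (m.getD p.1 0) p.2)) m)
        PySem.Dict.empty
    let product := ["red", "green", "blue"].foldl (fun p c => p * minimum_set.getD c 0) 1
    answer + product) 0

-- ===== PORT B =====
-- peak game color = max([0] + [round.get(color, 0) for round in game])
def pvPeak (game : List (List (String × Int))) (color : String) : Int :=
  ((0 : Int) :: game.map (fun round => (PySem.Dict.ofList round).getD color 0)).foldl max 0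

def subtask_2_alt (games : List (List (List (String × Int)))) : Int :=
  (games.map (fun game => pvPeak game "red" * pvPeak game "green" * pvPeak game "blue")).sum

-- ===== PRECONDITION & SPEC =====
def Spec_subtask_2 (games : List (List (List (String × Int)))) (out : Int) : Prop := out = subtask_2_alt games
instance (games : List (List (List (String × Int)))) (out : Int) : Decidable (Spec_subtask_2 games out) := by unfold Spec_subtask_2; infer_instance

-- ===== CLAIM (what is proved, stated in full; the proofs are below) =====
def Claim_equal_subtask_2 : Prop := ∀ (games : List (List (List (String × Int)))), Dom_subtask_2 games → Spec_subtask_2 games (subtask_2 games)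

-- ===== LEMMAS AND PROOFS =====

-- One round of A's dict-update loop, read back at any key: the running value becomes
-- max of the old value and the round-dict's value at that key (old values nonnegative).
theorem pv_step_getD (l : List (String × Int)) (m : PySem.Dict String Int)
    (hm : ∀ x, 0 ≤ m.getD x 0) (hl : (l.map (·.1)).Nodup) (c : String) :
    (l.foldl (fun m p => m.insert p.1 (max (m.getD p.1 0) p.2)) m).getD c 0
      = max (m.getD c 0) ((PySem.Dict.mk l).getD c 0) := by
  induction l generalizing m with
  | nil =>
      have : (PySem.Dict.mk ([] : List (String × Int))).getD c 0 = 0 := rfl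
      simp [List.foldl, this, max_eq_left (hm c)]
  | cons p l ih =>
      obtain ⟨k, v⟩ := p
      simp only [List.map_cons, List.nodup_cons] at hl
      have hm' : ∀ x, 0 ≤ (m.insert k (max (m.getD k 0) v)).getD x 0 := by
        intro x
        rw [PySem.Dict.getD_insert]
        split_ifs with h
        · exact le_trans (hm k) (le_max_left _ _)
        · exact hm x
      rw [List.foldl_cons, ih _ hm' hl.2]
      rw [PySem.Dict.getD_eq_get?_getD (PySem.Dict.mk ((k, v) :: l)) c 0, PySem.Dict.get?_mk_cons]
      by_cases hc : c = k
      · subst hc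
        have h1 : (PySem.Dict.mk l).get? c = none := by
          rw [PySem.Dict.get?_eq_none_iff_not_mem_keys]
          simpa [PySem.Dict.keys] using hl.1
        rw [PySem.Dict.getD_insert]
        simp [PySem.Dict.getD_eq_get?_getD, h1, max_assoc]
        have hmc : (0:Int) ≤ (m.get? c).getD 0 := by
          rw [← PySem.Dict.getD_eq_get?_getD]; exact hm c
        omega
      · rw [PySem.Dict.getD_insert]
        simp [hc, Ne.symm hc, PySem.Dict.getD_eq_get?_getD]
theorem pv_game_getD (g : List (List (String × Int))) (m : PySem.Dict String Int)
    (hm : ∀ x, 0 ≤ m.getD x 0) (c : String) :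
    (g.foldl (fun m round =>
        (PySem.Dict.ofList round).items.foldl
          (fun m p => m.insert p.1 (max (m.getD p.1 0) p.2)) m) m).getD c 0
      = g.foldl (fun acc round => max acc ((PySem.Dict.ofList round).getD c 0)) (m.getD c 0) := by
  induction g generalizing m with
  | nil => rfl
  | cons r g ih =>
      have hl : ((PySem.Dict.ofList r).items.map (·.1)).Nodup := PySem.Dict.nodup_keys_ofList r
      have hstep := pv_step_getD (PySem.Dict.ofList r).items m hm
      have hm' : ∀ x, 0 ≤ ((PySem.Dict.ofList r).items.foldl
          (fun m p => m.insert p.1 (max (m.getD p.1 0) p.2)) m).getD x 0 := by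
        intro x
        rw [hstep hl x]
        exact le_trans (hm x) (le_max_left _ _)
      rw [List.foldl_cons, ih _ hm', List.foldl_cons, hstep hl c]

theorem subtask_2_spec : Claim_equal_subtask_2 := by
  intro games _
  unfold Spec_subtask_2 subtask_2 subtask_2_alt
  rw [PySem.List.foldl_add games _ 0]
  simp only [zero_add]
  congr 1
  apply List.map_congr_left
  intro game _
  have hpow : ∀ c, (game.foldl (fun m round =>
        (PySem.Dict.ofList round).items.foldl
          (fun m p => m.insert p.1 (max (m.getD p.1 0) p.2)) m) PySem.Dict.empty).getD c 0
      = pvPeak game c := by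
    intro c
    rw [pv_game_getD game PySem.Dict.empty (fun x => by rw [PySem.Dict.getD_empty]) c]
    simp [pvPeak, PySem.Dict.getD_empty, List.foldl_map]
  simp only [List.foldl_cons, List.foldl_nil, one_mul]
  rw [hpow "red", hpow "green", hpow "blue"]
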